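-- pv_equiv track=rewrite | github.com/valhrd/Playground | uncategorised/lc.py | generate
-- ===== SOURCE A (Python) =====
-- def generate(ls, fP, sP):
--     n = len(ls)
--     opps = [(ls[i], ls[n - 1 - i]) for i in range(n // 2)]
--     poss = []
--
--     i, j = ls.index(fP), ls.index(sP)
--     if i + j == n - 1:
--         return poss
--
--     def make(temp, opps, index):
--         if index == len(opps):
--             poss.append(sorted(temp.copy()))
--             return
--
--         if fP in opps[index]:
--             temp.append(fP)
--         elif sP in opps[index]:
--             temp.append(sP)
--         else:
--             temp.append(opps[index][0])
--             make(temp, opps, index + 1)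
--             temp.pop()
--             temp.append(opps[index][1])
--         make(temp, opps, index + 1)
--         temp.pop()
--
--     temp = []
--     if len(ls) % 2:
--         temp.append(ls[n // 2])
--     make(temp, opps, 0)
--     return poss
-- ===== SOURCE B (Python) =====
-- def generate(ls, fP, sP):
--     n = len(ls)
--     if ls.index(fP) + ls.index(sP) == n - 1:
--         return []
--     # classify the opposing pairs once: forced elements go to base, the rest are free pairs
--     base = [ls[n // 2]] if n % 2 else []
--     free = []
--     for i in range(n // 2):
--         pair = (ls[i], ls[n - 1 - i])
--         if fP in pair:
--             base.append(fP)
--         elif sP in pair: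
--             base.append(sP)
--         else:
--             free.append(pair)
--     return [sorted(base + ch) for ch in _prods(free)]
--
--
-- def _prods(free):
--     # all choices of one element per pair, first pair most significant, [0] before [1]
--     if not free:
--         return [[]]
--     rest = _prods(free[1:])
--     a, b = free[0]
--     return [[a] + c for c in rest] + [[b] + c for c in rest]
-- ===== Notes on version B (the rewrite author's own statement) =====
-- stated objective: alternative
-- what changed: Replaces A's backtracking recursion over a mutable temp (append/recurse/pop with forced-pair branches inline) by a single classification pass that splits the opposing pairs into forced base elements and free pairs, then enumerates the cartesian product of the free pairs and sorts base+choice for each; same 2^k lists in the same order.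
import Mathlib
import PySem

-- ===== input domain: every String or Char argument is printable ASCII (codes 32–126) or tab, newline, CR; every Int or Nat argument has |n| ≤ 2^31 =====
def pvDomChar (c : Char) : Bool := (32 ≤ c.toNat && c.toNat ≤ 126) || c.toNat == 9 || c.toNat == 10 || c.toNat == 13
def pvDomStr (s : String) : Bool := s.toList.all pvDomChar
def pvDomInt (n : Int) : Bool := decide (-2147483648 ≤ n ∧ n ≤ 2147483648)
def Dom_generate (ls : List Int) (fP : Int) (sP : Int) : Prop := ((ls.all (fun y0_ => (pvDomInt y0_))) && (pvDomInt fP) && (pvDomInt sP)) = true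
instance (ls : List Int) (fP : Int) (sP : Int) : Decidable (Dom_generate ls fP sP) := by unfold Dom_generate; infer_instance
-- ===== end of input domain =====

-- B replaces A's backtracking recursion (mutable temp, append/pop) by classifying the pairs
-- once into forced base elements and free pairs and enumerating the product of the free pairs
-- (objective: alternative decomposition; same output lists in the same order).

-- ===== PORT A =====
-- the inner function make: recursion over the remaining pairs, temp accumulated by append
-- (Python's temp.append/temp.pop backtracking becomes passing temp ++ [x] to the recursive call)
def generateMake (fP sP : Int) (temp : List Int) : List (Int × Int) → List (List Int)
  | [] => [PySem.List.sorted temp (fun x => x)]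
  | p :: rest =>
    if p.1 = fP ∨ p.2 = fP then generateMake fP sP (temp ++ [fP]) rest
    else if p.1 = sP ∨ p.2 = sP then generateMake fP sP (temp ++ [sP]) rest
    else generateMake fP sP (temp ++ [p.1]) rest ++ generateMake fP sP (temp ++ [p.2]) rest

def generate (ls : List Int) (fP : Int) (sP : Int) : List (List Int) :=
  let n : Int := ls.length
  -- ls[i] / ls[n-1-i] for i in range(n//2): indices always in range, so pyGetD with default 0 is exact
  let opps := (PySem.List.pyRange 0 (PySem.Int.floordiv n 2) 1).map
      (fun i => (PySem.List.pyGetD ls i 0, PySem.List.pyGetD ls (n - 1 - i) 0))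
  match PySem.List.index? ls fP, PySem.List.index? ls sP with
  | some i, some j =>
    if (i : Int) + (j : Int) = n - 1 then []
    else
      let temp : List Int :=
        if PySem.Int.mod n 2 = 1 then [PySem.List.pyGetD ls (PySem.Int.floordiv n 2) 0] else []
      generateMake fP sP temp opps
  | _, _ => []  -- ls.index raises ValueError in Python here; excluded by Pre_generate

-- ===== PORT B =====
-- _prods: all choices of one element per free pair, first pair most significant
def prodsB : List (Int × Int) → List (List Int)
  | [] => [[]]
  | p :: rest =>
    let r := prodsB rest
    r.map (fun c => [p.1] ++ c) ++ r.map (fun c => [p.2] ++ c)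

def generate_alt (ls : List Int) (fP : Int) (sP : Int) : List (List Int) :=
  let n : Int := ls.length
  match PySem.List.index? ls fP with
  | none => []  -- ls.index raises ValueError in Python here; excluded by Pre_generate
  | some i =>
  match PySem.List.index? ls sP with
  | none => []  -- likewise ValueError
  | some j =>
    if (i : Int) + (j : Int) = n - 1 then []
    else
      let base0 : List Int :=
        if PySem.Int.mod n 2 = 1 then [PySem.List.pyGetD ls (PySem.Int.floordiv n 2) 0] else []
      -- the classifying for-loop over range(n//2): (base, free) accumulator
      let bf := (PySem.List.pyRange 0 (PySem.Int.floordiv n 2) 1).foldl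
        (fun (acc : List Int × List (Int × Int)) i =>
          let p := (PySem.List.pyGetD ls i 0, PySem.List.pyGetD ls (n - 1 - i) 0)
          if p.1 = fP ∨ p.2 = fP then (acc.1 ++ [fP], acc.2)
          else if p.1 = sP ∨ p.2 = sP then (acc.1 ++ [sP], acc.2)
          else (acc.1, acc.2 ++ [p])) (base0, ([] : List (Int × Int)))
      (prodsB bf.2).map (fun ch => PySem.List.sorted (bf.1 ++ ch) (fun x => x))

-- ===== PRECONDITION & SPEC =====
-- Pre_ excludes exactly the inputs where Python's ls.index raises ValueError (fP or sP not in ls)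
def Pre_generate (ls : List Int) (fP : Int) (sP : Int) : Prop := fP ∈ ls ∧ sP ∈ ls
instance (ls : List Int) (fP : Int) (sP : Int) : Decidable (Pre_generate ls fP sP) := by unfold Pre_generate; infer_instance
def pvWitness_generate : List Int × Int × Int := ([1, 2, 3, 4], 1, 3)

def Spec_generate (ls : List Int) (fP : Int) (sP : Int) (out : List (List Int)) : Prop := out = generate_alt ls fP sP
instance (ls : List Int) (fP : Int) (sP : Int) (out : List (List Int)) : Decidable (Spec_generate ls fP sP out) := by unfold Spec_generate; infer_instance

-- ===== CLAIM (what is proved, stated in full; the proofs are below) =====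
def Claim_equal_generate : Prop := ∀ (ls : List Int) (fP : Int) (sP : Int), Dom_generate ls fP sP → Pre_generate ls fP sP → Spec_generate ls fP sP (generate ls fP sP)

-- ===== LEMMAS AND PROOFS =====

-- make depends on temp only up to permutation (its output only sorts temp)
lemma generateMake_perm (fP sP : Int) (P : List (Int × Int)) :
    ∀ t1 t2 : List Int, t1.Perm t2 → generateMake fP sP t1 P = generateMake fP sP t2 P := by
  induction P with
  | nil =>
    intro t1 t2 h
    simp only [generateMake]
    rw [PySem.List.sorted_eq_sorted_of_perm t1 t2 (fun x => x) (fun _ _ h => h) h]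
  | cons p rest ih =>
    intro t1 t2 h
    simp only [generateMake]
    split_ifs with h1 h2
    · exact ih _ _ (h.append_right [fP])
    · exact ih _ _ (h.append_right [sP])
    · rw [ih _ _ (h.append_right [p.1]), ih _ _ (h.append_right [p.2])]

-- the product of free pairs, with one more pair appended at the end
lemma prodsB_append_single (xs : List (Int × Int)) (p : Int × Int) :
    prodsB (xs ++ [p]) = (prodsB xs).flatMap (fun c => [c ++ [p.1], c ++ [p.2]]) := by
  induction xs with
  | nil => simp [prodsB]
  | cons q xs ih =>
    simp only [List.cons_append, prodsB, ih]
    simp [List.map_flatMap, List.flatMap_map]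

-- the classify step of B's loop, on a pair directly
def stepC (fP sP : Int) (acc : List Int × List (Int × Int)) (p : Int × Int) : List Int × List (Int × Int) :=
  if p.1 = fP ∨ p.2 = fP then (acc.1 ++ [fP], acc.2)
  else if p.1 = sP ∨ p.2 = sP then (acc.1 ++ [sP], acc.2)
  else (acc.1, acc.2 ++ [p])

-- key invariant: B's classify-then-product equals A's backtracking, for any accumulator state
lemma classify_prod_eq_make (fP sP : Int) (P : List (Int × Int)) :
    ∀ (b : List Int) (fr : List (Int × Int)),
      (prodsB (P.foldl (stepC fP sP) (b, fr)).2).map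
          (fun ch => PySem.List.sorted ((P.foldl (stepC fP sP) (b, fr)).1 ++ ch) (fun x => x))
      = (prodsB fr).flatMap (fun pre => generateMake fP sP (b ++ pre) P) := by
  induction P with
  | nil =>
    intro b fr
    simp only [List.foldl_nil, generateMake]
    rw [List.map_eq_flatMap]
  | cons p rest ih =>
    intro b fr
    simp only [List.foldl_cons, stepC, generateMake]
    split_ifs with h1 h2
    · rw [ih (b ++ [fP]) fr]
      refine List.flatMap_congr (fun pre _ => ?_)
      apply generateMake_perm
      rw [List.append_assoc, List.append_assoc]
      exact (List.perm_append_comm).append_left b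
    · rw [ih (b ++ [sP]) fr]
      refine List.flatMap_congr (fun pre _ => ?_)
      apply generateMake_perm
      rw [List.append_assoc, List.append_assoc]
      exact (List.perm_append_comm).append_left b
    · rw [ih b (fr ++ [p]), prodsB_append_single]
      rw [List.flatMap_assoc]
      refine List.flatMap_congr (fun pre _ => ?_)
      simp [List.append_assoc]

-- B's loop over range(n//2), fused with the pair construction, equals A's backtracking over the pair list
lemma bridge (fP sP : Int) (m : Int) (f : Int → Int × Int) (b : List Int) :
    (prodsB ((PySem.List.pyRange 0 m 1).foldl (fun acc i => stepC fP sP acc (f i)) (b, ([] : List (Int × Int)))).2).map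
        (fun ch => PySem.List.sorted
          (((PySem.List.pyRange 0 m 1).foldl (fun acc i => stepC fP sP acc (f i)) (b, ([] : List (Int × Int)))).1 ++ ch)
          (fun x => x))
      = generateMake fP sP b ((PySem.List.pyRange 0 m 1).map f) := by
  have h := @List.foldl_map _ _ _ f (stepC fP sP) (PySem.List.pyRange 0 m 1) (b, ([] : List (Int × Int)))
  rw [← h, classify_prod_eq_make]
  simp [prodsB]

-- ===== VERDICT (by name: the statement is the Claim_ definition above) =====
theorem generate_spec : Claim_equal_generate := by
  intro ls fP sP _ _
  unfold Spec_generate generate generate_alt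
  cases hf : PySem.List.index? ls fP with
  | none => rfl
  | some i =>
    cases hs : PySem.List.index? ls sP with
    | none => rfl
    | some j =>
      simp only
      split_ifs with hij hm
      · rfl
      · exact (bridge fP sP (PySem.Int.floordiv (ls.length : Int) 2)
          (fun i => (PySem.List.pyGetD ls i 0, PySem.List.pyGetD ls ((ls.length : Int) - 1 - i) 0))
          _).symm
      · exact (bridge fP sP (PySem.Int.floordiv (ls.length : Int) 2)
          (fun i => (PySem.List.pyGetD ls i 0, PySem.List.pyGetD ls ((ls.length : Int) - 1 - i) 0))
          _).symm
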